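-- pv_equiv track=rewrite | github.com/PaddlePaddle/PaddleSlim | paddleslim/prune/prune_worker.py | _valid_reshape2
-- ===== SOURCE A (Python) =====
-- def _valid_reshape2(shape):
--     # case1: only reshape last several dimensions. e.g. [0,0,1,2] returns True while [1,0,0,1] returns False.
--     changed = False
--     for sh in shape:
--         if sh == 0 and changed:
--             return False
--         if sh != 0:
--             changed = True
--     return True
-- ===== SOURCE B (Python) =====
-- def _valid_reshape2(shape):
--     for i, sh in enumerate(shape):
--         if sh != 0:
--             return 0 not in shape[i:]
--     return True
-- ===== Notes on version B (the rewrite author's own statement) =====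
-- stated objective: simpler
-- what changed: Replaces the flag-threaded loop (boolean accumulator checked at each zero) with a locate-then-scan decomposition: find the first non-zero entry, then answer by a membership test for 0 over the suffix from that index.
import Mathlib
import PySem

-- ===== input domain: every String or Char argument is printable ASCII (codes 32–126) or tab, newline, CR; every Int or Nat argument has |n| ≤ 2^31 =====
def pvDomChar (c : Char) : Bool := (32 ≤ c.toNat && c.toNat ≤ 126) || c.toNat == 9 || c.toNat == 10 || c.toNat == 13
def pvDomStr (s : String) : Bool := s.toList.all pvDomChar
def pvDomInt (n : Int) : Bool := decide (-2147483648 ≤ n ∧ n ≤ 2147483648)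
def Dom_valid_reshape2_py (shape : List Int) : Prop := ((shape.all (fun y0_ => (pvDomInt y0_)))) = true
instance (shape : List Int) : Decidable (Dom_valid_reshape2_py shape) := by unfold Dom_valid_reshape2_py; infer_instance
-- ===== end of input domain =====

-- B replaces A's flag-threaded loop by a locate-first-nonzero then suffix-membership decomposition (simpler).


-- ===== PORT A =====
-- loop with boolean accumulator `changed`
def validReshape2Loop : List Int → Bool → Bool
  | [], _ => true
  | sh :: rest, changed =>
    if sh == 0 && changed then false
    else validReshape2Loop rest (if sh != 0 then true else changed)

def valid_reshape2_py (shape : List Int) : Bool :=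
  validReshape2Loop shape false

-- ===== PORT B =====
-- locate the first non-zero entry; at that point answer `0 not in shape[i:]`
-- (the current suffix IS shape[i:], so the recursion carries the suffix directly)
def validReshape2Find : List Int → Bool
  | [] => true
  | sh :: rest =>
    if sh != 0 then !((sh :: rest).contains 0)
    else validReshape2Find rest

def valid_reshape2_py_alt (shape : List Int) : Bool :=
  validReshape2Find shape

-- ===== PRECONDITION & SPEC =====
def Spec_valid_reshape2_py (shape : List Int) (out : Bool) : Prop := out = valid_reshape2_py_alt shape
instance (shape : List Int) (out : Bool) : Decidable (Spec_valid_reshape2_py shape out) := by unfold Spec_valid_reshape2_py; infer_instance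

-- ===== CLAIM (what is proved, stated in full; the proofs are below) =====
def Claim_equal_valid_reshape2_py : Prop := ∀ (shape : List Int), Dom_valid_reshape2_py shape → Spec_valid_reshape2_py shape (valid_reshape2_py shape)

-- ===== LEMMAS AND PROOFS =====
-- With the flag set, A's loop just checks that no zero remains; with it clear, it equals B.
theorem validReshape2Loop_eq (l : List Int) :
    validReshape2Loop l true = !(l.contains 0) ∧ validReshape2Loop l false = validReshape2Find l := by
  induction l with
  | nil => simp [validReshape2Loop, validReshape2Find]
  | cons sh rest ih =>
    by_cases h : sh = 0
    · simp [validReshape2Loop, validReshape2Find, h, ih.1, ih.2]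
    · refine ⟨?_, ?_⟩ <;>
        · simp [validReshape2Loop, validReshape2Find, h, ih.1]
          exact fun _ e => h e.symm

-- ===== VERDICT (by name: the statement is the Claim_ definition above) =====
theorem valid_reshape2_py_spec : Claim_equal_valid_reshape2_py := by
  intro shape _
  unfold Spec_valid_reshape2_py valid_reshape2_py valid_reshape2_py_alt
  exact (validReshape2Loop_eq shape).2
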